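-- pv_equiv track=rewrite | github.com/lxmx/PyPlucker | PyPlucker/Retriever.py | GuessType
-- ===== SOURCE A (Python) =====
-- def GuessType (name):
--     """Given a name, guess the mime type"""
--     name = name.lower()
--     def has_extension (ext, name=name):
--         return name[-len(ext):] == ext
--
--     known_map = { '.gif': 'image/gif',
--                   '.png': 'image/png',
--                   '.jpg': 'image/jpeg',
--                   '.jpe': 'image/jpeg',
--                   '.jpeg': 'image/jpeg',
--                   # FIXME: Bugs with webp when using bpp=16
--                   '.webp': 'image/webp',
--                   '.html': 'text/html',
--                   '.htm': 'text/html',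
--                   '.txt': 'text/plain',
--                   '.asc': 'text/plain',
--                   }
--     for ext in list(known_map.keys ()):
--         if has_extension (ext):
--             return known_map[ext]
--     return 'unknown/unknown'
-- ===== SOURCE B (Python) =====
-- def _mime(ext):
--     if ext == '.gif':
--         return 'image/gif'
--     elif ext == '.png':
--         return 'image/png'
--     elif ext == '.jpg' or ext == '.jpe' or ext == '.jpeg':
--         return 'image/jpeg'
--     elif ext == '.webp':
--         return 'image/webp'
--     elif ext == '.html' or ext == '.htm':
--         return 'text/html'
--     elif ext == '.txt' or ext == '.asc':
--         return 'text/plain'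
--     else:
--         return 'unknown/unknown'
--
--
-- def GuessType(name):
--     """Given a name, guess the mime type"""
--     suffix = ''
--     for c in reversed(name.lower()):
--         if c == '.':
--             return _mime('.' + suffix)
--         suffix = c + suffix
--     return 'unknown/unknown'
-- ===== Notes on version B (the rewrite author's own statement) =====
-- stated objective: alternative
-- what changed: Replaces the loop over ten dict keys with negative-slice suffix tests by a reverse scan that stops at the last dot, extracting the extension once and classifying it with a plain if/elif chain (no dict at all).
import Mathlib
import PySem

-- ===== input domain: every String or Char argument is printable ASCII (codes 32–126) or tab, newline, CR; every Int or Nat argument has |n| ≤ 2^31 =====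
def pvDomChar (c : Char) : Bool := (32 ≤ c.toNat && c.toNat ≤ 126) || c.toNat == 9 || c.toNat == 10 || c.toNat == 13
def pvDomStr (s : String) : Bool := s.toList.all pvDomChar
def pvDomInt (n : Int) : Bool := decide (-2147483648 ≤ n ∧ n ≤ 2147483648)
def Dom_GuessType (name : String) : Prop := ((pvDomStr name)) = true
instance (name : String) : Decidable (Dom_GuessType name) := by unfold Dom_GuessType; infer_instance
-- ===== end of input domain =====

-- B replaces A's loop of per-extension negative-slice suffix tests by a reverse scan that stops at the last dot plus an if/elif chain on the extracted extension (alternative decomposition, same cost).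


-- ===== PORT A =====
-- has_extension(ext): name[-len(ext):] == ext, over code points
def pvHasExt (ext : List Char) (l : List Char) : Bool :=
  PySem.List.slice l (some (-(ext.length : Int))) none == ext

def pvKnownMap : PySem.Dict (List Char) String :=
  PySem.Dict.ofList
    [ (['.','g','i','f'], "image/gif"),
      (['.','p','n','g'], "image/png"),
      (['.','j','p','g'], "image/jpeg"),
      (['.','j','p','e'], "image/jpeg"),
      (['.','j','p','e','g'], "image/jpeg"),
      (['.','w','e','b','p'], "image/webp"),
      (['.','h','t','m','l'], "text/html"),
      (['.','h','t','m'], "text/html"),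
      (['.','t','x','t'], "text/plain"),
      (['.','a','s','c'], "text/plain") ]

-- 'for ext in list(known_map.keys()): if has_extension(ext): return known_map[ext]'
-- (the key is always a key of the dict here, so known_map[ext] is exactly getD)
def pvLoopA (l : List Char) : List (List Char) → String
  | [] => "unknown/unknown"
  | k :: ks => if pvHasExt k l then PySem.Dict.getD pvKnownMap k "unknown/unknown" else pvLoopA l ks

def GuessType (name : String) : String :=
  pvLoopA (PySem.Chars.lower name.toList) (PySem.Dict.keys pvKnownMap)

-- ===== PORT B =====
-- Source B's _mime: the if/elif chain on the extracted extension
def pvMime (e : List Char) : String :=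
  if e = ['.','g','i','f'] then "image/gif"
  else if e = ['.','p','n','g'] then "image/png"
  else if e = ['.','j','p','g'] ∨ e = ['.','j','p','e'] ∨ e = ['.','j','p','e','g'] then "image/jpeg"
  else if e = ['.','w','e','b','p'] then "image/webp"
  else if e = ['.','h','t','m','l'] ∨ e = ['.','h','t','m'] then "text/html"
  else if e = ['.','t','x','t'] ∨ e = ['.','a','s','c'] then "text/plain"
  else "unknown/unknown"

-- Source B's loop: 'for c in reversed(name.lower()): if c == '.': return _mime('.' + suffix); suffix = c + suffix'
def pvScanB (suffix : List Char) : List Char → String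
  | [] => "unknown/unknown"
  | c :: rest => if c = '.' then pvMime ('.' :: suffix) else pvScanB (c :: suffix) rest

def GuessType_alt (name : String) : String :=
  pvScanB [] (PySem.Chars.lower name.toList).reverse

-- ===== PRECONDITION & SPEC =====
def Spec_GuessType (name : String) (out : String) : Prop := out = GuessType_alt name
instance (name : String) (out : String) : Decidable (Spec_GuessType name out) := by unfold Spec_GuessType; infer_instance

-- ===== CLAIM (what is proved, stated in full; the proofs are below) =====
def Claim_equal_GuessType : Prop := ∀ (name : String), Dom_GuessType name → Spec_GuessType name (GuessType name)

-- ===== LEMMAS AND PROOFS =====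

lemma pvHasExt_iff (ext l : List Char) (h : ext ≠ []) : pvHasExt ext l = true ↔ ext <:+ l := by
  unfold pvHasExt
  rw [PySem.List.slice_from_neg_natCast l ext.length (by cases ext <;> simp_all), beq_iff_eq]
  constructor
  · intro hdrop; exact hdrop ▸ List.drop_suffix _ _
  · rintro ⟨t, rfl⟩
    simp

lemma pvExistsLastDot : ∀ (l : List Char), '.' ∈ l → ∃ p r, l = p ++ '.' :: r ∧ '.' ∉ r
  | [], h => absurd h (by simp)
  | c :: t, h => by
    by_cases ht : '.' ∈ t
    · obtain ⟨p, r, hpr, hr⟩ := pvExistsLastDot t ht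
      exact ⟨c :: p, r, by simp [hpr], hr⟩
    · have hc : c = '.' := by
        rcases List.mem_cons.mp h with h' | h'
        · exact h'.symm
        · exact absurd h' ht
      exact ⟨[], t, by simp [hc], ht⟩

lemma pvLastDotUnique (p1 r1 p2 r2 : List Char) (h : p1 ++ '.' :: r1 = p2 ++ '.' :: r2)
    (h1 : '.' ∉ r1) (h2 : '.' ∉ r2) : p1 = p2 ∧ r1 = r2 := by
  have hs1 : ('.' :: r1) <:+ (p2 ++ '.' :: r2) := ⟨p1, h⟩
  have hs2 : ('.' :: r2) <:+ (p2 ++ '.' :: r2) := ⟨p2, rfl⟩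
  have hor := List.suffix_or_suffix_of_suffix hs1 hs2
  have hr : r1 = r2 := by
    rcases hor with ⟨t, ht⟩ | ⟨t, ht⟩
    · cases t with
      | nil => injection ht
      | cons a t' =>
        exfalso; apply h2
        rw [List.cons_append] at ht
        injection ht with _ htail
        rw [← htail]; simp
    · cases t with
      | nil => injection ht with _ h'; exact h'.symm
      | cons a t' =>
        exfalso; apply h1
        rw [List.cons_append] at ht
        injection ht with _ htail
        rw [← htail]; simp
  subst hr
  refine ⟨?_, rfl⟩
  exact List.append_inj_left' h rfl

-- B's reverse scan passes over a dot-free block r by prepending it to the suffix accumulator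
lemma pvScanB_nodot (r : List Char) (rest suf : List Char) (h : '.' ∉ r) :
    pvScanB suf (r.reverse ++ rest) = pvScanB (r ++ suf) rest := by
  induction r generalizing rest suf with
  | nil => simp
  | cons a t ih =>
    have ha : a ≠ '.' := fun hh => h (by simp [hh])
    have ht : '.' ∉ t := fun hh => h (List.mem_cons_of_mem _ hh)
    rw [List.reverse_cons, List.append_assoc, ih _ _ ht]
    simp [pvScanB, ha]

lemma pvKeysShape : ∀ k ∈ PySem.Dict.keys pvKnownMap, k ≠ [] ∧ k.head? = some '.' ∧ '.' ∉ k.tail := by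
  decide

lemma pvLoopA_eq (l e : List Char) : ∀ ks, (∀ k ∈ ks, pvHasExt k l = true ↔ k = e) →
    pvLoopA l ks = if e ∈ ks then PySem.Dict.getD pvKnownMap e "unknown/unknown" else "unknown/unknown" := by
  intro ks
  induction ks with
  | nil => simp [pvLoopA]
  | cons k ks ih =>
    intro hiff
    by_cases hk : k = e
    · subst hk
      have : pvHasExt k l = true := (hiff k (by simp)).mpr rfl
      simp [pvLoopA, this]
    · have : pvHasExt k l = false := by
        cases hx : pvHasExt k l
        · rfl
        · exact absurd ((hiff k (by simp)).mp hx) hk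
      rw [pvLoopA, this]
      simp only [Bool.false_eq_true, if_false]
      rw [ih (fun k' hk' => hiff k' (List.mem_cons_of_mem _ hk'))]
      have hek : e ≠ k := fun hh => hk hh.symm
      simp [List.mem_cons, hek]

-- the if/elif chain agrees with A's dict lookup guarded by key membership
lemma pvMime_eq_lookup (e : List Char) :
    pvMime e = if e ∈ PySem.Dict.keys pvKnownMap
               then PySem.Dict.getD pvKnownMap e "unknown/unknown" else "unknown/unknown" := by
  by_cases he : e ∈ PySem.Dict.keys pvKnownMap
  · rw [if_pos he]
    have he' : e = ['.','g','i','f'] ∨ e = ['.','p','n','g'] ∨ e = ['.','j','p','g'] ∨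
        e = ['.','j','p','e'] ∨ e = ['.','j','p','e','g'] ∨ e = ['.','w','e','b','p'] ∨
        e = ['.','h','t','m','l'] ∨ e = ['.','h','t','m'] ∨ e = ['.','t','x','t'] ∨
        e = ['.','a','s','c'] := by
      have hkeys : PySem.Dict.keys pvKnownMap =
          [['.','g','i','f'], ['.','p','n','g'], ['.','j','p','g'], ['.','j','p','e'],
           ['.','j','p','e','g'], ['.','w','e','b','p'], ['.','h','t','m','l'],
           ['.','h','t','m'], ['.','t','x','t'], ['.','a','s','c']] := by decide
      rw [hkeys] at he
      simpa [List.mem_cons] using he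
    rcases he' with rfl|rfl|rfl|rfl|rfl|rfl|rfl|rfl|rfl|rfl <;> decide
  · rw [if_neg he]
    unfold pvMime
    split_ifs with h1 h2 h3 h4 h5 h6 <;>
      first
      | rfl
      | (exfalso; apply he;
         first
         | (subst h1; decide) | (subst h2; decide)
         | (rcases h3 with rfl|rfl|rfl <;> decide)
         | (subst h4; decide)
         | (rcases h5 with rfl|rfl <;> decide)
         | (rcases h6 with rfl|rfl <;> decide))

lemma pvMain (name : String) : GuessType name = GuessType_alt name := by
  simp only [GuessType, GuessType_alt]
  set l := PySem.Chars.lower name.toList with hl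
  by_cases hd : '.' ∈ l
  · obtain ⟨p, r, hpr, hr⟩ := pvExistsLastDot l hd
    rw [hpr]
    -- B side: scan over r.reverse, hit the dot, call pvMime on '.' :: r
    have hB : pvScanB [] (p ++ '.' :: r).reverse = pvMime ('.' :: r) := by
      rw [List.reverse_append, List.reverse_cons, List.append_assoc,
          pvScanB_nodot r _ [] hr]
      simp [pvScanB]
    rw [hB]
    -- A side: the loop returns the dict entry of the extension iff it is a key
    have hiff : ∀ k ∈ PySem.Dict.keys pvKnownMap, pvHasExt k (p ++ '.' :: r) = true ↔ k = '.' :: r := by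
      intro k hk
      obtain ⟨kne, khd, ktl⟩ := pvKeysShape k hk
      obtain ⟨c, kt, rfl⟩ : ∃ c kt, k = c :: kt := by
        cases k with
        | nil => exact absurd rfl kne
        | cons c kt => exact ⟨c, kt, rfl⟩
      have hc : c = '.' := by simpa using khd
      subst hc
      constructor
      · intro hext
        obtain ⟨t, ht⟩ := (pvHasExt_iff _ _ kne).mp hext
        have := pvLastDotUnique t kt p r ht (by simpa using ktl) hr
        rw [this.2]
      · intro hke
        rw [hke]
        exact (pvHasExt_iff _ _ (by simp)).mpr ⟨p, rfl⟩
    rw [pvLoopA_eq (p ++ '.' :: r) ('.' :: r) _ hiff, pvMime_eq_lookup]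
  · -- no dot: B's scan runs off the end; none of A's suffix tests can fire
    have hB : pvScanB [] l.reverse = "unknown/unknown" := by
      have := pvScanB_nodot l [] [] hd
      simpa [pvScanB] using this
    rw [hB]
    have hiff : ∀ k ∈ PySem.Dict.keys pvKnownMap, pvHasExt k l = true ↔ k = [] := by
      intro k hk
      obtain ⟨kne, khd, ktl⟩ := pvKeysShape k hk
      constructor
      · intro hext
        exfalso; apply hd
        have hsuf := (pvHasExt_iff _ _ kne).mp hext
        have hdk : '.' ∈ k := by
          cases k with
          | nil => exact absurd rfl kne
          | cons c kt => simp at khd; simp [khd]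
        exact hsuf.subset hdk
      · intro h'; exact absurd h' kne
    rw [pvLoopA_eq l [] _ hiff]
    have : ([] : List Char) ∉ PySem.Dict.keys pvKnownMap := by decide
    rw [if_neg this]

-- ===== VERDICT (by name: the statement is the Claim_ definition above) =====
theorem GuessType_spec : Claim_equal_GuessType := by
  intro name _
  unfold Spec_GuessType
  exact pvMain name
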